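-- pv_equiv track=rewrite | github.com/huckles-learning-lab/pyThunderbird | thunderbird/mail.py | toSbdFolder
-- ===== SOURCE A (Python) =====
-- def toSbdFolder(folderURI):
--     '''
--     get the SBD folder for the given folderURI
--     '''
--     folder=folderURI.replace('mailbox://nobody@','')
--     # https://stackoverflow.com/a/14007559/1497139
--     parts=folder.split("/")
--     sbdFolder="/Mail/"
--     for i,part in enumerate(parts):
--         if i==0: # e.g. "Local Folders" ...
--             sbdFolder+="%s/" % part
--         elif i<len(parts)-1:
--             sbdFolder+="%s.sbd/" % part
--         else:
--             sbdFolder+="%s" % part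
--     return sbdFolder
-- ===== SOURCE B (Python) =====
-- def toSbdFolder(folderURI):
--     '''
--     get the SBD folder for the given folderURI
--     '''
--     folder = folderURI.replace('mailbox://nobody@', '')
--     parts = folder.split('/')
--     return '/Mail/' + parts[0] + '/' + '.sbd/'.join(parts[1:])
-- ===== Notes on version B (the rewrite author's own statement) =====
-- stated objective: simpler
-- what changed: Replaces the index-checked enumerate loop with a closed-form string build: head element plus the tail joined with '.sbd/'.
import Mathlib
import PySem

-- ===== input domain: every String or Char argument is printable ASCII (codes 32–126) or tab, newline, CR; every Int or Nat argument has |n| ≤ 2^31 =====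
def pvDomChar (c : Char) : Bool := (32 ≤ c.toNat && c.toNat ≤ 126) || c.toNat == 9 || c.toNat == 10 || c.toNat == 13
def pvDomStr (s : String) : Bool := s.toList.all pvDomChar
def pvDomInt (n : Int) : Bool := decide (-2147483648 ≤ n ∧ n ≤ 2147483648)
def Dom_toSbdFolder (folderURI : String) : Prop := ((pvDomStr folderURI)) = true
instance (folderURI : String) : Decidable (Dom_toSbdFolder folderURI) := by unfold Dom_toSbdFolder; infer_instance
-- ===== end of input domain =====

-- B replaces A's index-checked enumerate loop by a closed-form build (head + '.sbd/'-joined tail); same O(n) cost, simpler.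

-- ===== PORT A =====
def toSbdFolder (folderURI : String) : String :=
  let folder := PySem.Chars.replace folderURI.toList "mailbox://nobody@".toList [];
  let parts := PySem.Chars.splitOn folder ['/'];
  String.ofList ((PySem.List.enumerate parts 0).foldl
    (fun acc ip =>
      if ip.1 == 0 then acc ++ ip.2 ++ ['/']
      else if ip.1 < (parts.length : Int) - 1 then acc ++ ip.2 ++ ".sbd/".toList
      else acc ++ ip.2)
    "/Mail/".toList)

-- ===== PORT B =====
def toSbdFolder_alt (folderURI : String) : String :=
  let folder := PySem.Chars.replace folderURI.toList "mailbox://nobody@".toList [];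
  let parts := PySem.Chars.splitOn folder ['/'];
  String.ofList ("/Mail/".toList ++ parts.headD [] ++ ['/'] ++
    PySem.Chars.join ".sbd/".toList (PySem.List.slice parts (some 1) none))

-- ===== PRECONDITION & SPEC =====
def Spec_toSbdFolder (folderURI : String) (out : String) : Prop := out = toSbdFolder_alt folderURI
instance (folderURI : String) (out : String) : Decidable (Spec_toSbdFolder folderURI out) := by unfold Spec_toSbdFolder; infer_instance

-- ===== CLAIM (what is proved, stated in full; the proofs are below) =====
def Claim_equal_toSbdFolder : Prop := ∀ (folderURI : String), Dom_toSbdFolder folderURI → Spec_toSbdFolder folderURI (toSbdFolder folderURI)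

-- ===== LEMMAS AND PROOFS =====

-- str.split never returns an empty list of pieces
theorem splitOn_go_ne_nil (sep : List Char) (fuel : Nat) :
    ∀ (l cur : List Char) (acc : List (List Char)),
      PySem.Chars.splitOn.go sep fuel l cur acc ≠ [] := by
  induction fuel with
  | zero =>
      intro l cur acc
      simp [PySem.Chars.splitOn.go]
  | succ n ih =>
      intro l cur acc
      cases l with
      | nil => simp [PySem.Chars.splitOn.go]
      | cons c rest =>
          rw [PySem.Chars.splitOn.go]
          split_ifs with h
          · exact ih _ _ _
          · exact ih _ _ _

theorem splitOn_ne_nil (s sep : List Char) : PySem.Chars.splitOn s sep ≠ [] :=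
  splitOn_go_ne_nil sep (s.length + 1) s [] []

-- the tail of A's loop (indices ≥ 1) is exactly a '.sbd/'-join of the remaining pieces
theorem tailFold (sep : List Char) (n : Int) :
    ∀ (rest : List (List Char)) (s : Int) (acc : List Char), 1 ≤ s → s + rest.length = n →
      (PySem.List.enumerate rest s).foldl
        (fun a ip =>
          if ip.1 == 0 then a ++ ip.2 ++ ['/']
          else if ip.1 < n - 1 then a ++ ip.2 ++ sep
          else a ++ ip.2) acc
      = acc ++ PySem.Chars.join sep rest := by
  intro rest
  induction rest with
  | nil =>
      intro s acc hs hn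
      simp [PySem.List.enumerate_nil, PySem.Chars.join, List.intercalate]
  | cons x t ih =>
      intro s acc hs hn
      rw [PySem.List.enumerate_cons]
      simp only [List.foldl_cons]
      have hne : ¬ (s == 0) = true := by simp; omega
      cases t with
      | nil =>
          have hlt : ¬ s < n - 1 := by simp at hn; omega
          simp [hne, hlt, PySem.List.enumerate_nil, PySem.Chars.join, List.intercalate]
      | cons y u =>
          have hlt : s < n - 1 := by
            simp only [List.length_cons] at hn; push_cast at hn; omega
          rw [if_neg hne, if_pos hlt]
          rw [ih (s + 1) _ (by omega) (by simp at hn ⊢; omega)]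
          rw [PySem.Chars.join_cons_cons]
          simp [List.append_assoc]

-- ===== VERDICT (by name: the statement is the Claim_ definition above) =====
theorem toSbdFolder_spec : Claim_equal_toSbdFolder := by
  intro folderURI _
  unfold Spec_toSbdFolder toSbdFolder toSbdFolder_alt
  simp only []
  set folder := PySem.Chars.replace folderURI.toList "mailbox://nobody@".toList [] with hf
  cases h : PySem.Chars.splitOn folder ['/'] with
  | nil => exact absurd h (splitOn_ne_nil folder ['/'])
  | cons p rest =>
      congr 1
      rw [PySem.List.enumerate_cons]
      simp only [List.foldl_cons, if_pos (by simp : ((0 : Int) == 0) = true)]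
      norm_num only
      rw [tailFold ".sbd/".toList ((p :: rest).length : Int) rest 1
            ("/Mail/".toList ++ p ++ ['/']) (by omega) (by simp; omega)]
      rw [PySem.List.slice_from (ha := by omega)]
      simp [List.append_assoc]
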